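-- pv_equiv track=rewrite | github.com/dankeyy/algo | rising_diffs.py | rising_diffs
-- ===== SOURCE A (Python) =====
-- def rising_diffs(seq):
--
--     def dfilter(seq):
--         maxdiff = 0
--
--         diff = lambda x: abs(seq[x + 1] - seq[x]) # absolute difference of following elements
--         bigger_than_max = lambda diff: diff > maxdiff # bigger diff checker
--
--         yield seq[0]
--         for i in range( len(seq) - 1):
--             if bigger_than_max( currdiff := diff(i) ):
--                 yield seq[i + 1]
--                 maxdiff = currdiff
--
--     return list(dfilter(seq))
-- ===== SOURCE B (Python) =====
-- def rising_diffs(seq):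
--     head = seq[0]
--     diffs = [abs(b - a) for a, b in zip(seq, seq[1:])]
--     thresholds = []
--     m = 0
--     for d in diffs:
--         thresholds.append(m)
--         m = m if m > d else d
--     return [head] + [y for y, d, t in zip(seq[1:], diffs, thresholds) if d > t]
-- ===== Notes on version B (the rewrite author's own statement) =====
-- stated objective: alternative
-- what changed: Replaces A's generator with a mutable running max fused into the scan by three separate passes: a diffs table, a prefix-threshold table, and one stateless zip-filter comprehension selecting the elements.
import Mathlib
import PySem

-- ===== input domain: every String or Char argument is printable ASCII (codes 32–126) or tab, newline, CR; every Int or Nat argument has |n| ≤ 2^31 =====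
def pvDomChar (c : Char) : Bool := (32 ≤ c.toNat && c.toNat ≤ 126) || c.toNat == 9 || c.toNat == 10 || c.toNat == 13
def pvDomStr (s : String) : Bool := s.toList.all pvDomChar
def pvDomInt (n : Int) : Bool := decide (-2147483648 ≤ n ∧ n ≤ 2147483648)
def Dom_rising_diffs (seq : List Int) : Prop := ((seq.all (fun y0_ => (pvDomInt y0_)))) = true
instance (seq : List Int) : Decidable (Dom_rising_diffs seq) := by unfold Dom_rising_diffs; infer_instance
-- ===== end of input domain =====

-- B replaces A's fused generator (running max mutated inside the scan) by three separate
-- passes: a diffs table, a prefix-threshold table, and a stateless zip-filter selection.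

-- ===== PORT A =====
-- A: yield seq[0], then for i in range(len(seq)-1) yield seq[i+1] when the abs diff
-- exceeds the running max (updated only on yield).  Indices in the loop are always in
-- range, so pyGetD is exact there; the empty list (seq[0] raises) is outside Pre_.
def rising_diffs (seq : List Int) : List Int :=
  match seq with
  | [] => []   -- seq[0] raises IndexError; excluded by Pre_
  | x :: _ =>
    ((PySem.List.pyRange 0 ((seq.length : Int) - 1) 1).foldl
      (fun (st : Int × List Int) i =>
        -- currdiff := abs(seq[i+1] - seq[i])
        if |PySem.List.pyGetD seq (i + 1) 0 - PySem.List.pyGetD seq i 0| > st.1 then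
          (|PySem.List.pyGetD seq (i + 1) 0 - PySem.List.pyGetD seq i 0|,
           st.2 ++ [PySem.List.pyGetD seq (i + 1) 0])
        else st)
      (0, [x])).2

-- ===== PORT B =====
-- B: diffs table, prefix-threshold table built by a fold, then one zip-filter pass.
-- (Python's 3-ary zip(seq[1:], diffs, thresholds) is ported as nested binary zips.)
def rising_diffs_alt (seq : List Int) : List Int :=
  match seq with
  | [] => []   -- seq[0] raises IndexError; excluded by Pre_
  | x :: rest =>
    let diffs := (seq.zip rest).map (fun p => |p.2 - p.1|)
    let thresholds := (diffs.foldl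
      (fun (st : List Int × Int) d => (st.1 ++ [st.2], if st.2 > d then st.2 else d))
      ([], 0)).1
    x :: ((rest.zip (diffs.zip thresholds)).filterMap
      (fun p => if p.2.1 > p.2.2 then some p.1 else none))

-- ===== PRECONDITION & SPEC =====
-- A (and B) raise IndexError on the empty list (seq[0]); only that input is excluded.
def Pre_rising_diffs (seq : List Int) : Prop := seq ≠ []
instance (seq : List Int) : Decidable (Pre_rising_diffs seq) := by unfold Pre_rising_diffs; infer_instance
def pvWitness_rising_diffs : List Int := ([1, 3, 2])

def Spec_rising_diffs (seq : List Int) (out : List Int) : Prop := out = rising_diffs_alt seq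
instance (seq : List Int) (out : List Int) : Decidable (Spec_rising_diffs seq out) := by unfold Spec_rising_diffs; infer_instance

-- ===== CLAIM (what is proved, stated in full; the proofs are below) =====
def Claim_equal_rising_diffs : Prop := ∀ (seq : List Int), Dom_rising_diffs seq → Pre_rising_diffs seq → Spec_rising_diffs seq (rising_diffs seq)

-- ===== LEMMAS AND PROOFS =====

-- Common reference recursion: walk the consecutive pairs with the running max.
def goRise : List (Int × Int) → Int → List Int
  | [], _ => []
  | p :: t, m => if |p.2 - p.1| > m then p.2 :: goRise t |p.2 - p.1| else goRise t m

-- A's loop equals goRise on the pair list of the remaining suffix.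
lemma rising_loopA (seq : List Int) :
    ∀ (j k : Nat) (m : Int) (acc : List Int), k + j + 1 = seq.length →
    ((PySem.List.pyRange (k : Int) ((seq.length : Int) - 1) 1).foldl
      (fun (st : Int × List Int) i =>
        if |PySem.List.pyGetD seq (i + 1) 0 - PySem.List.pyGetD seq i 0| > st.1 then
          (|PySem.List.pyGetD seq (i + 1) 0 - PySem.List.pyGetD seq i 0|,
           st.2 ++ [PySem.List.pyGetD seq (i + 1) 0])
        else st)
      (m, acc)).2
      = acc ++ goRise ((seq.drop k).zip (seq.drop (k + 1))) m := by
  intro j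
  induction j with
  | zero =>
    intro k m acc hk
    rw [PySem.List.pyRange_one_eq_nil (by omega)]
    have h1 : seq.drop (k + 1) = [] := List.drop_eq_nil_of_le (by omega)
    simp [h1, goRise]
  | succ n ih =>
    intro k m acc hk
    have hk1 : k < seq.length := by omega
    have hk2 : k + 1 < seq.length := by omega
    rw [PySem.List.pyRange_one_cons (by push_cast; omega)]
    have hget : PySem.List.pyGetD seq ((k : Int)) 0 = seq[k] := by
      rw [PySem.List.pyGetD_natCast]; exact List.getD_eq_getElem seq 0 hk1
    have hget1 : PySem.List.pyGetD seq ((k : Int) + 1) 0 = seq[k + 1] := by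
      rw [show (k : Int) + 1 = ((k + 1 : Nat) : Int) by omega,
        PySem.List.pyGetD_natCast]
      exact List.getD_eq_getElem seq 0 hk2
    have hdrop : seq.drop k = seq[k] :: seq.drop (k + 1) := List.drop_eq_getElem_cons hk1
    have hdrop1 : seq.drop (k + 1) = seq[k + 1] :: seq.drop (k + 2) := List.drop_eq_getElem_cons hk2
    rw [List.foldl_cons]
    simp only [hget, hget1]
    rw [hdrop, hdrop1, List.zip_cons_cons, ← hdrop1]
    have hcast : (k : Int) + 1 = ((k + 1 : Nat) : Int) := by omega
    by_cases hc : |seq[k + 1] - seq[k]| > m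
    · simp only [goRise, if_pos hc]
      rw [hcast, ih (k + 1) _ _ (by omega)]
      simp
    · simp only [goRise, if_neg hc]
      rw [hcast, ih (k + 1) _ _ (by omega)]

-- B's threshold fold builds the prefix-maximum table thr.
def thrRise : List Int → Int → List Int
  | [], _ => []
  | d :: t, m => m :: thrRise t (if m > d then m else d)

lemma rising_thr_fold (ds : List Int) :
    ∀ (acc : List Int) (m : Int),
    (ds.foldl (fun (st : List Int × Int) d => (st.1 ++ [st.2], if st.2 > d then st.2 else d))
      (acc, m)).1 = acc ++ thrRise ds m := by
  induction ds with
  | nil => intro acc m; simp [thrRise]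
  | cons d t ih => intro acc m; rw [List.foldl_cons]; simp only [ih, thrRise]; simp

-- B's zip-filter pass over (snd, diff, threshold) equals goRise.
lemma rising_sel (ps : List (Int × Int)) :
    ∀ (m : Int),
    ((ps.map Prod.snd).zip ((ps.map (fun p => |p.2 - p.1|)).zip
        (thrRise (ps.map (fun p => |p.2 - p.1|)) m))).filterMap
      (fun p => if p.2.1 > p.2.2 then some p.1 else none) = goRise ps m := by
  induction ps with
  | nil => intro m; simp [goRise]
  | cons p t ih =>
    intro m
    simp only [List.map_cons, thrRise, List.zip_cons_cons, List.filterMap_cons]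
    by_cases hc : |p.2 - p.1| > m
    · have hmax : (if m > |p.2 - p.1| then m else |p.2 - p.1|) = |p.2 - p.1| := by omega
      simp only [goRise, if_pos hc, hmax, ih]
    · have hmax : (if m > |p.2 - p.1| then m else |p.2 - p.1|) = m := by omega
      simp only [goRise, if_neg hc, hmax, ih]

-- ===== VERDICT (by name: the statement is the Claim_ definition above) =====
theorem rising_diffs_spec : Claim_equal_rising_diffs := by
  intro seq _ hpre
  unfold Spec_rising_diffs
  cases seq with
  | nil => exact absurd rfl hpre
  | cons x rest =>
    simp only [rising_diffs, rising_diffs_alt]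
    have hA := rising_loopA (x :: rest) rest.length 0 0 [x] (by simp)
    simp only [Nat.cast_zero, Nat.zero_add, List.drop_zero, List.drop_succ_cons] at hA
    rw [hA]
    have hrest : (((x :: rest).zip rest).map Prod.snd) = rest := by
      exact List.map_snd_zip (by simp)
    have hsel := rising_sel ((x :: rest).zip rest) 0
    rw [hrest] at hsel
    rw [rising_thr_fold, List.nil_append, hsel]
    simp
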